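-- pv_equiv track=rewrite | github.com/LC-John/Hamming-Code | Hamming.py | __bits2bits
-- ===== SOURCE A (Python) =====
-- def __bits2bits(bits):
--
--     tmp_code = []
--     for b in bits:
--         if b == '0':
--             tmp_code.append(0)
--         elif b == '1':
--             tmp_code.append(1)
--         else:
--             print ("\""+bits+"\" is not a bit code sequence!")
--             print ("Error! Abort!")
--             return []
--     return tmp_code
-- ===== SOURCE B (Python) =====
-- def __bits2bits(bits):
--     if all(b in '01' for b in bits):
--         return [int(b) for b in bits]
--     print("\"" + bits + "\" is not a bit code sequence!")
--     print("Error! Abort!")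
--     return []
-- ===== Notes on version B (the rewrite author's own statement) =====
-- stated objective: idiomatic
-- what changed: Replaces A's single fused append-or-abort loop with a validate-then-build two-pass structure: an all() validity check followed by a comprehension.
import Mathlib
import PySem

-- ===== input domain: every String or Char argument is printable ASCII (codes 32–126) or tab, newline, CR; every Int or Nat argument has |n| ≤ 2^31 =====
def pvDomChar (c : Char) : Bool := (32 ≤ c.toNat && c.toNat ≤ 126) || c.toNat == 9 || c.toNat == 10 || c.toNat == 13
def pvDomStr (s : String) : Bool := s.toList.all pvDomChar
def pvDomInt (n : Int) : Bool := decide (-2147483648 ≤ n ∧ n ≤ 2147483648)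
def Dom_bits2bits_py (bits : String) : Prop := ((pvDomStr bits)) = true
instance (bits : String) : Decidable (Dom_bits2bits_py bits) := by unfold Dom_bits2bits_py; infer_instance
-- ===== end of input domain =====

-- B replaces A's fused append-or-abort loop with a validate-then-build two-pass
-- structure (objective: idiomatic). Equivalence is about the return value; both
-- print the same two lines on invalid input.

-- ===== PORT A =====
-- A's loop with accumulator tmp_code; a non-bit char discards it and returns [].
def bits2bits_py_go (bits : List Char) (tmp_code : List Int) : List Int :=
  match bits with
  | [] => tmp_code
  | b :: rest =>
    if b = '0' then bits2bits_py_go rest (tmp_code ++ [0])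
    else if b = '1' then bits2bits_py_go rest (tmp_code ++ [1])
    else []

def bits2bits_py (bits : String) : List Int :=
  bits2bits_py_go bits.toList []

-- ===== PORT B =====
def bits2bits_py_alt (bits : String) : List Int :=
  if bits.toList.all (fun b => b = '0' ∨ b = '1') then
    bits.toList.map (fun b => if b = '0' then (0 : Int) else 1)
  else []

-- ===== PRECONDITION & SPEC =====
def Spec_bits2bits_py (bits : String) (out : List Int) : Prop := out = bits2bits_py_alt bits
instance (bits : String) (out : List Int) : Decidable (Spec_bits2bits_py bits out) := by unfold Spec_bits2bits_py; infer_instance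

-- ===== CLAIM (what is proved, stated in full; the proofs are below) =====
def Claim_equal_bits2bits_py : Prop := ∀ (bits : String), Dom_bits2bits_py bits → Spec_bits2bits_py bits (bits2bits_py bits)

-- ===== LEMMAS AND PROOFS =====
theorem bits2bits_py_go_eq (l : List Char) (acc : List Int) :
    bits2bits_py_go l acc =
      if l.all (fun b => b = '0' ∨ b = '1') then
        acc ++ l.map (fun b => if b = '0' then (0 : Int) else 1)
      else [] := by
  induction l generalizing acc with
  | nil => simp [bits2bits_py_go]
  | cons b rest ih =>
    by_cases h0 : b = '0'
    · simp [bits2bits_py_go, h0, ih]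
    · by_cases h1 : b = '1'
      · simp [bits2bits_py_go, h1, ih]
      · simp [bits2bits_py_go, h0, h1]

-- ===== VERDICT (by name: the statement is the Claim_ definition above) =====
theorem bits2bits_py_spec : Claim_equal_bits2bits_py := by
  intro bits _
  unfold Spec_bits2bits_py bits2bits_py bits2bits_py_alt
  rw [bits2bits_py_go_eq]
  simp
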